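-- pv_equiv track=rewrite | github.com/SOHITVISH/hackerrank-solutions-main | skills/python_basic/string_transformation.py | transformSentence
-- ===== SOURCE A (Python) =====
-- def transformSentence(sentence):
--     sentence.strip()
--     res = ''
--     ind = 0
--     for x in sentence:
--         if (ind == 0):
--             res += x
--             ind += 1
--         elif (x == ' '):
--             res += x
--             ind += 1
--         else:
--             y = sentence[ind-1]
--             if (y == ' '):
--                 res += x
--                 ind += 1
--             elif (y.lower() < x.lower()):
--                 res += x.upper()
--                 ind += 1
--             elif (y.lower() > x.lower()):
--                 res += x.lower()
--                 ind += 1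
--             else:
--                 res += x
--                 ind += 1
--     return res
-- ===== SOURCE B (Python) =====
-- def transformSentence(sentence):
--     out = []
--     for w in sentence.split(' '):
--         t = w[:1]
--         for prev, cur in zip(w, w[1:]):
--             p, c = prev.lower(), cur.lower()
--             t += cur.upper() if p < c else (cur.lower() if p > c else cur)
--         out.append(t)
--     return ' '.join(out)
-- ===== Notes on version B (the rewrite author's own statement) =====
-- stated objective: simpler
-- what changed: Replaces A's single loop that tracks an index counter and re-reads the previous character by indexing back into the sentence with a split-on-space / per-word pairwise transform over zip(w, w[1:]) / join decomposition, with no index bookkeeping.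
import Mathlib
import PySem

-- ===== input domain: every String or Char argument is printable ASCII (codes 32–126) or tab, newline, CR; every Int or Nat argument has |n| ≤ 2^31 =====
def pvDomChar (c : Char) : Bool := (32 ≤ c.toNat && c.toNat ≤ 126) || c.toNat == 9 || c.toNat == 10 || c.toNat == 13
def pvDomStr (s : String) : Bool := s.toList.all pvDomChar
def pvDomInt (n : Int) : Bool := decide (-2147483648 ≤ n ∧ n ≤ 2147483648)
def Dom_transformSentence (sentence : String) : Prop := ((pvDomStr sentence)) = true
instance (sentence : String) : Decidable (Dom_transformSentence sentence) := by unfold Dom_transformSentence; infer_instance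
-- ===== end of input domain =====

-- B replaces A's index-tracking single loop (with sentence[ind-1] lookups) by split(' ') / per-word
-- pairwise transform / ' '.join — a simpler decomposition, same complexity.


-- ===== PORT A =====
-- one loop iteration of A: state is (res, ind); `cs` is the whole sentence (for sentence[ind-1]).
-- `pyGetD … ' '` ports sentence[ind-1]: 1 ≤ ind ≤ len(sentence) whenever that line runs, so it is in range.
def aStep (cs : List Char) (st : List Char × Int) (x : Char) : List Char × Int :=
  let res := st.1
  let ind := st.2
  if ind == 0 then (res ++ [x], ind + 1)
  else if x == ' ' then (res ++ [x], ind + 1)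
  else
    let y := PySem.List.pyGetD cs (ind - 1) ' '
    if y == ' ' then (res ++ [x], ind + 1)
    else if PySem.Chars.lowerChar y < PySem.Chars.lowerChar x then
      (res ++ [PySem.Chars.upperChar x], ind + 1)
    else if PySem.Chars.lowerChar y > PySem.Chars.lowerChar x then
      (res ++ [PySem.Chars.lowerChar x], ind + 1)
    else (res ++ [x], ind + 1)

def transformSentence (sentence : String) : String :=
  let _unusedStrip := PySem.Str.strip sentence   -- sentence.strip() : result discarded, as in A
  let cs := sentence.toList
  String.ofList (cs.foldl (aStep cs) ([], 0)).1

-- ===== PORT B =====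
-- per-word transform: w[:1] then one char per pair of zip(w, w[1:]).
def bWord (w : List Char) : List Char :=
  w.take 1 ++ (w.zip (w.drop 1)).map (fun pc =>
    if PySem.Chars.lowerChar pc.1 < PySem.Chars.lowerChar pc.2 then PySem.Chars.upperChar pc.2
    else if PySem.Chars.lowerChar pc.1 > PySem.Chars.lowerChar pc.2 then PySem.Chars.lowerChar pc.2
    else pc.2)

def transformSentence_alt (sentence : String) : String :=
  match PySem.Chars.split? sentence.toList [' '] with
  | some ws => String.ofList (PySem.Chars.join [' '] (ws.map bWord))
  | none => ""   -- unreachable: the separator " " is nonempty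

-- ===== PRECONDITION & SPEC =====
def Spec_transformSentence (sentence : String) (out : String) : Prop := out = transformSentence_alt sentence
instance (sentence : String) (out : String) : Decidable (Spec_transformSentence sentence out) := by unfold Spec_transformSentence; infer_instance

-- ===== CLAIM (what is proved, stated in full; the proofs are below) =====
def Claim_equal_transformSentence : Prop := ∀ (sentence : String), Dom_transformSentence sentence → Spec_transformSentence sentence (transformSentence sentence)

-- ===== LEMMAS AND PROOFS =====

-- the common per-character rule: previous char p, current char c
def pvF (p c : Char) : Char :=
  if c = ' ' then c
  else if p = ' ' then c
  else if PySem.Chars.lowerChar p < PySem.Chars.lowerChar c then PySem.Chars.upperChar c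
  else if PySem.Chars.lowerChar p > PySem.Chars.lowerChar c then PySem.Chars.lowerChar c
  else c

-- the common whole-string form both ports are reduced to
def pvG (cs : List Char) : List Char :=
  cs.take 1 ++ (cs.zip (cs.drop 1)).map (fun pc => pvF pc.1 pc.2)

theorem pvF_space_left (c : Char) : pvF ' ' c = c := by
  by_cases h : c = ' ' <;> simp [pvF, h]

theorem pvG_cons_space (rest : List Char) :
    pvG (' ' :: rest) = ' ' :: pvG rest := by
  cases rest with
  | nil => rfl
  | cons r rs => simp [pvG, pvF_space_left]

-- ----- A = pvG -----

theorem aStep_char (cs pre rest res : List Char) (p x : Char)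
    (hcs : cs = pre ++ p :: x :: rest) :
    aStep cs (res, ((pre.length + 1 : Nat) : Int)) x
      = (res ++ [pvF p x], ((pre.length + 2 : Nat) : Int)) := by
  have hidx : (((pre.length + 1 : Nat)) : Int) - 1 = ((pre.length : Nat) : Int) := by push_cast; ring
  have hget : List.getD cs pre.length ' ' = p := by
    rw [hcs, List.getD_eq_getElem?_getD, List.getElem?_append_right (le_refl _)]; simp
  have h0 : ¬(((pre.length + 1 : Nat) : Int) = 0) := by omega
  have hind2 : (((pre.length + 1 : Nat)) : Int) + 1 = (((pre.length + 2 : Nat)) : Int) := by push_cast; ring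
  simp only [aStep, hidx, PySem.List.pyGetD_natCast, hget, hind2, beq_iff_eq, pvF]
  split_ifs <;> first | rfl | omega

theorem aLoop_eq (rest : List Char) :
    ∀ (pre res : List Char) (p : Char) (cs : List Char), cs = pre ++ p :: rest →
    rest.foldl (aStep cs) (res, ((pre.length + 1 : Nat) : Int))
      = (res ++ ((p :: rest).zip rest).map (fun pc => pvF pc.1 pc.2),
         ((pre.length + 1 + rest.length : Nat) : Int)) := by
  induction rest with
  | nil => intro pre res p cs _; simp
  | cons x rs ih =>
    intro pre res p cs hcs
    have h1 := aStep_char cs pre rs res p x hcs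
    have hl : (pre ++ [p]).length + 1 = pre.length + 2 := by simp
    have h2 := ih (pre ++ [p]) (res ++ [pvF p x]) x cs (by simp [hcs])
    rw [hl] at h2
    simp only [List.foldl_cons, h1, h2, List.zip_cons_cons, List.map_cons, Prod.mk.injEq]
    refine ⟨by simp, by push_cast [List.length_cons]; omega⟩

theorem portA_eq_pvG (s : String) :
    transformSentence s = String.ofList (pvG s.toList) := by
  unfold transformSentence
  cases hcs : s.toList with
  | nil => simp [pvG]
  | cons c rest =>
    have hstep : aStep (c :: rest) ([], 0) c = ([c], ((List.length ([] : List Char) + 1 : Nat) : Int)) := by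
      simp [aStep]
    have h := aLoop_eq rest [] [c] c (c :: rest) rfl
    simp only [List.foldl_cons, hstep, h, pvG]
    simp

-- ----- B = pvG -----

theorem splitOnGo_eq (fuel : Nat) : ∀ (l cur : List Char) (acc : List (List Char)),
    l.length < fuel →
    PySem.Chars.splitOn.go [' '] fuel l cur acc
      = acc.reverse ++ (List.splitOnP (fun c => c == ' ') l).modifyHead (cur.reverse ++ ·) := by
  induction fuel with
  | zero => intro l cur acc h; omega
  | succ n ih =>
    intro l cur acc h
    cases l with
    | nil =>
      rw [PySem.Chars.splitOn.go]
      simp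
      omega
    | cons c rest =>
      rw [PySem.Chars.splitOn.go]
      by_cases hc : c = ' '
      · have hpref : List.isPrefixOf [' '] (c :: rest) = true := by simp [List.isPrefixOf, hc]
        rw [if_pos hpref]
        have hdrop : List.drop (List.length [' ']) (c :: rest) = rest := by simp
        rw [hdrop]
        simp only [hc, List.splitOnP_cons, beq_self_eq_true, if_pos]
        rw [ih rest [] (cur.reverse :: acc) (by simpa using Nat.lt_of_succ_lt_succ h)]
        cases hs : List.splitOnP (fun c => c == ' ') rest with
        | nil => exact absurd hs (List.splitOnP_ne_nil _ rest)
        | cons a l' => simp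
      · have hpref : List.isPrefixOf [' '] (c :: rest) = false := by
          simp [List.isPrefixOf]; exact fun h' => absurd h'.symm hc
        rw [if_neg (by simp [hpref])]
        rw [ih rest (c :: cur) acc (by simpa using Nat.lt_of_succ_lt_succ h)]
        simp only [List.splitOnP_cons, beq_iff_eq, hc, if_false, List.modifyHead_modifyHead]
        congr 1
        cases hs : List.splitOnP (fun c => c == ' ') rest with
        | nil => exact absurd hs (List.splitOnP_ne_nil _ rest)
        | cons a l' => simp

theorem splitOn_space (cs : List Char) :
    PySem.Chars.splitOn cs [' '] = List.splitOnP (fun c => c == ' ') cs := by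
  unfold PySem.Chars.splitOn
  rw [splitOnGo_eq (cs.length + 1) cs [] [] (by omega)]
  cases hs : List.splitOnP (fun c => c == ' ') cs with
  | nil => exact absurd hs (List.splitOnP_ne_nil _ cs)
  | cons a l' => simp

-- bWord on a nonempty word, unfolded one step
theorem bWord_cons (a : Char) (w : List Char) :
    bWord (a :: w) = a :: ((a :: w).zip w).map (fun pc =>
      if PySem.Chars.lowerChar pc.1 < PySem.Chars.lowerChar pc.2 then PySem.Chars.upperChar pc.2
      else if PySem.Chars.lowerChar pc.1 > PySem.Chars.lowerChar pc.2 then PySem.Chars.lowerChar pc.2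
      else pc.2) := by
  simp [bWord]

-- on space-free pairs the two rules agree
theorem pvF_eq_bRule (p c : Char) (hp : p ≠ ' ') (hc : c ≠ ' ') :
    pvF p c = (if PySem.Chars.lowerChar p < PySem.Chars.lowerChar c then PySem.Chars.upperChar c
      else if PySem.Chars.lowerChar p > PySem.Chars.lowerChar c then PySem.Chars.lowerChar c
      else c) := by
  simp [pvF, hp, hc]

-- tail of pvG after a space-free block followed by ' '
theorem pvG_go_split (w : List Char) : ∀ (p : Char) (rest : List Char),
    (' ' : Char) ∉ w → p ≠ ' ' →
    ((p :: (w ++ ' ' :: rest)).zip (w ++ ' ' :: rest)).map (fun pc => pvF pc.1 pc.2)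
      = ((p :: w).zip w).map (fun pc =>
          if PySem.Chars.lowerChar pc.1 < PySem.Chars.lowerChar pc.2 then PySem.Chars.upperChar pc.2
          else if PySem.Chars.lowerChar pc.1 > PySem.Chars.lowerChar pc.2 then PySem.Chars.lowerChar pc.2
          else pc.2) ++ ' ' :: pvG rest := by
  induction w with
  | nil =>
    intro p rest _ hp
    have h1 : pvF p ' ' = ' ' := by simp [pvF]
    cases rest with
    | nil => simp [h1, pvG]
    | cons r rs => simp [h1, pvF_space_left, pvG]
  | cons a w' ih =>
    intro p rest hw hp
    have ha : a ≠ ' ' := by intro h; exact hw (by simp [h])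
    have hw' : (' ' : Char) ∉ w' := fun h => hw (by simp [h])
    simp only [List.cons_append, List.zip_cons_cons, List.map_cons]
    rw [ih a rest hw' ha, pvF_eq_bRule p a hp ha]
    try simp

-- space-free word: bWord computes pvG's pairwise map
theorem pvG_go_single (w : List Char) : ∀ (p : Char),
    (' ' : Char) ∉ w → p ≠ ' ' →
    ((p :: w).zip w).map (fun pc => pvF pc.1 pc.2)
      = ((p :: w).zip w).map (fun pc =>
          if PySem.Chars.lowerChar pc.1 < PySem.Chars.lowerChar pc.2 then PySem.Chars.upperChar pc.2
          else if PySem.Chars.lowerChar pc.1 > PySem.Chars.lowerChar pc.2 then PySem.Chars.lowerChar pc.2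
          else pc.2) := by
  induction w with
  | nil => intro p _ _; rfl
  | cons a w' ih =>
    intro p hw hp
    have ha : a ≠ ' ' := by intro h; exact hw (by simp [h])
    have hw' : (' ' : Char) ∉ w' := fun h => hw (by simp [h])
    simp only [List.zip_cons_cons, List.map_cons]
    rw [ih a hw' ha, pvF_eq_bRule p a hp ha]

-- intercalate over a cons with a nonempty tail
theorem intercalate_cons_ne_nil (x : Char) (a : List Char) (l : List (List Char)) (h : l ≠ []) :
    [x].intercalate (a :: l) = a ++ x :: [x].intercalate l := by
  cases l with
  | nil => exact absurd rfl h
  | cons b l' => simp [List.intercalate]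

theorem joinB_eq_pvG (cs : List Char) :
    [' '].intercalate ((List.splitOnP (fun c => c == ' ') cs).map bWord) = pvG cs := by
  by_cases hmem : (' ' : Char) ∈ cs
  · obtain ⟨w, rest, hw, hcs⟩ : ∃ w rest, (' ' : Char) ∉ w ∧ cs = w ++ ' ' :: rest := by
      have hne : List.dropWhile (fun c => !(c == ' ')) cs ≠ [] := by
        intro h
        have := List.dropWhile_eq_nil_iff.mp h
        simp at this
        exact (this ' ' hmem) rfl
      cases hD : List.dropWhile (fun c => !(c == ' ')) cs with
      | nil => exact absurd hD hne
      | cons d ds =>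
        have hd : d = ' ' := by
          have := List.head_dropWhile_not (p := fun c => !(c == ' ')) (l := cs) (by simp [hD])
          simp [hD] at this
          exact this
        refine ⟨cs.takeWhile (fun c => !(c == ' ')), ds, ?_, ?_⟩
        · intro h
          have := List.mem_takeWhile_imp h
          simp at this
        · conv_lhs => rw [← List.takeWhile_append_dropWhile (p := fun c => !(c == ' ')) (l := cs)]
          rw [hD, hd]
    subst hcs
    have hsplit : List.splitOnP (fun c => c == ' ') (w ++ ' ' :: rest)
        = w :: List.splitOnP (fun c => c == ' ') rest := by
      apply List.splitOnP_first
      · intro x hx; simp; intro h; exact hw (h ▸ hx)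
      · simp
    rw [hsplit]
    have hrec : [' '].intercalate ((List.splitOnP (fun c => c == ' ') rest).map bWord) = pvG rest :=
      joinB_eq_pvG rest
    rw [List.map_cons, intercalate_cons_ne_nil _ _ _ (by
      simp [List.splitOnP_ne_nil]), hrec]
    cases w with
    | nil => simpa [bWord] using (pvG_cons_space rest).symm
    | cons a w' =>
      have ha : a ≠ ' ' := by intro h; exact hw (by simp [h])
      have hw' : (' ' : Char) ∉ w' := fun h => hw (by simp [h])
      rw [bWord_cons]
      show _ = pvG ((a :: (w' ++ ' ' :: rest)))
      unfold pvG
      simp only [List.take_cons, List.take_zero, List.drop_succ_cons, List.drop_zero,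
        List.zip_cons_cons, List.map_cons, List.cons_append, List.nil_append]
      rw [pvG_go_split w' a rest hw' ha]
      simp [pvG, List.drop_one]
  · rw [List.splitOnP_eq_single _ _ (by intro x hx; simp; intro h; exact hmem (h ▸ hx))]
    cases hw : cs with
    | nil => rfl
    | cons a w' =>
      have ha : a ≠ ' ' := by intro h; apply hmem; rw [hw]; simp [h]
      have hw' : (' ' : Char) ∉ w' := fun h => hmem (by rw [hw]; simp [h])
      rw [List.map_singleton]
      have hsing : [' '].intercalate [bWord (a :: w')] = bWord (a :: w') := by
        simp [List.intercalate]
      rw [hsing, bWord_cons]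
      unfold pvG
      simp only [List.take_cons, List.take_zero, List.drop_succ_cons, List.drop_zero,
        List.zip_cons_cons, List.map_cons, List.cons_append, List.nil_append]
      rw [← pvG_go_single w' a hw' ha]
      simp
termination_by cs.length
decreasing_by simp [hcs]; omega

theorem portB_eq_pvG (s : String) :
    transformSentence_alt s = String.ofList (pvG s.toList) := by
  unfold transformSentence_alt
  have h : PySem.Chars.split? s.toList [' '] = some (PySem.Chars.splitOn s.toList [' ']) := by
    simp [PySem.Chars.split?]
  rw [h, splitOn_space]
  show String.ofList (PySem.Chars.join [' '] (List.map bWord (List.splitOnP (fun c => c == ' ') s.toList))) = _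
  unfold PySem.Chars.join
  rw [joinB_eq_pvG]

-- ===== VERDICT (by name: the statement is the Claim_ definition above) =====
theorem transformSentence_spec : Claim_equal_transformSentence := by
  intro s _
  unfold Spec_transformSentence
  rw [portA_eq_pvG, portB_eq_pvG]
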